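-- pv_equiv track=rewrite | github.com/Mhmd-Amin/Cipher-Algorithms | cipher_attack.py | clear_extras
-- ===== SOURCE A (Python) =====
-- def clear_extras(frequency_dict: dict) -> dict:
--     remove_dict = {}
--     for key in frequency_dict.keys():
--         for sub_key in frequency_dict[key].keys():
--             for letter in sub_key:
--                 if letter.isdigit():
--                     if not remove_dict.get(key):
--                         remove_dict[key] = []
--                     remove_dict[key].append(sub_key)
--                     break
--
--     for k, values in remove_dict.items():
--         for value in values:
--             frequency_dict[k].pop(value)
--
--     return frequency_dict
-- ===== SOURCE B (Python) =====
-- DIGITS = frozenset("0123456789")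
--
-- def clear_extras(frequency_dict: dict) -> dict:
--     # Rebuild each inner dict with a filtering comprehension (set-disjointness test),
--     # instead of collecting keys to remove and popping them in a second pass.
--     # Note: A mutates the inner dicts in place; B replaces them with new dicts —
--     # the returned value is identical.
--     for key, inner in frequency_dict.items():
--         frequency_dict[key] = {sk: v for sk, v in inner.items() if DIGITS.isdisjoint(sk)}
--     return frequency_dict
-- ===== Notes on version B (the rewrite author's own statement) =====
-- stated objective: simpler
-- what changed: Rebuilds each inner dict with a filtering comprehension keeping sub-keys disjoint from the digit set, instead of accumulating a remove_dict of digit-containing keys and deleting them in a second pop pass.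
import Mathlib
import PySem

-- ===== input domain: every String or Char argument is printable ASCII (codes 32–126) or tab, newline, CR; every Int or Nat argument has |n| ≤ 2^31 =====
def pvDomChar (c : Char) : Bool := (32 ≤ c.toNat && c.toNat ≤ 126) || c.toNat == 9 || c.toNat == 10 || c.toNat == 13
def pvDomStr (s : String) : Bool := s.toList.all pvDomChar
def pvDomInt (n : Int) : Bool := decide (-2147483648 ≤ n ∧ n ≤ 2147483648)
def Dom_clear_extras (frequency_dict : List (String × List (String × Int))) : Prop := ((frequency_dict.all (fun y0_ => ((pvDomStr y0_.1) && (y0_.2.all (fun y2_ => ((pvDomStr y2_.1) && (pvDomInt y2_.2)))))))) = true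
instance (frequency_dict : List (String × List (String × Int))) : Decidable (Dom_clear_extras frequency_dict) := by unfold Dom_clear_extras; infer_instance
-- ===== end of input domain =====

-- B rebuilds each inner dict with a filtering comprehension (digit-set disjointness) instead of
-- A's accumulate-a-remove_dict-then-pop two-pass scheme; equivalence is about the RETURNED value
-- (A mutates the inner dicts in place, B replaces them with freshly built dicts).


-- ===== PORT A =====
-- sub_key contains a digit: Python's per-letter loop with break over `letter.isdigit()`;
-- exact on the printable-ASCII domain, where isdigit is exactly '0'..'9'.
def pyHasDigit (s : String) : Bool := s.toList.any (fun c => decide ('0' ≤ c) && decide (c ≤ '9'))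

-- frequency_dict[key]: first-match association-list lookup (key always present: it comes from .keys())
def dictGet (fd : List (String × List (String × Int))) (key : String) : List (String × Int) :=
  ((fd.find? (fun p => p.1 == key)).map Prod.snd).getD []

-- `if not remove_dict.get(key): remove_dict[key] = []` then `remove_dict[key].append(sub_key)`:
-- append v to the entry for k in place, or add a new entry (k, [v]) at the end.
def rdAppend : List (String × List String) → String → String → List (String × List String)
  | [], k, v => [(k, [v])]
  | p :: rest, k, v => if p.1 == k then (p.1, p.2 ++ [v]) :: rest else p :: rdAppend rest k v

-- inner.pop(v): drop the first pair keyed v (Python raises KeyError only when v is absent,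
-- which never happens under Pre_: every popped key was collected from that same dict).
def popKey : List (String × Int) → String → List (String × Int)
  | [], _ => []
  | q :: rest, v => if q.1 == v then rest else q :: popKey rest v

-- frequency_dict[k].pop(value): update the (first-match) entry for k in place.
def popEntry : List (String × List (String × Int)) → String → String → List (String × List (String × Int))
  | [], _, _ => []
  | p :: rest, k, v => if p.1 == k then (p.1, popKey p.2 v) :: rest else p :: popEntry rest k v

def clear_extras (frequency_dict : List (String × List (String × Int))) : List (String × List (String × Int)) :=
  let remove_dict :=
    (frequency_dict.map Prod.fst).foldl (fun rd key =>
      (dictGet frequency_dict key).foldl (fun rd q =>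
        if pyHasDigit q.1 then rdAppend rd key q.1 else rd) rd) []
  remove_dict.foldl (fun acc kv => kv.2.foldl (fun acc v => popEntry acc kv.1 v) acc) frequency_dict

-- ===== PORT B =====
-- DIGITS = frozenset("0123456789")
def pyDigits : List Char := ['0','1','2','3','4','5','6','7','8','9']

-- DIGITS.isdisjoint(sk): no character of sk is in the digit set
def digitsDisjoint (s : String) : Bool := s.toList.all (fun c => !(pyDigits.contains c))

-- for key, inner in frequency_dict.items(): frequency_dict[key] = {sk: v for sk, v in inner.items() if DIGITS.isdisjoint(sk)}
def clear_extras_alt (frequency_dict : List (String × List (String × Int))) : List (String × List (String × Int)) :=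
  frequency_dict.map (fun p => (p.1, p.2.filter (fun q => digitsDisjoint q.1)))

-- ===== PRECONDITION & SPEC =====
-- Pre_ excludes association lists with duplicate outer or duplicate inner keys: those do not
-- represent any Python dict (dict keys are unique), so A's behaviour on them is not defined.
def Pre_clear_extras (frequency_dict : List (String × List (String × Int))) : Prop :=
  (frequency_dict.map Prod.fst).Nodup ∧ ∀ p ∈ frequency_dict, (p.2.map Prod.fst).Nodup
instance (frequency_dict : List (String × List (String × Int))) : Decidable (Pre_clear_extras frequency_dict) := by unfold Pre_clear_extras; infer_instance

def pvWitness_clear_extras : (List (String × List (String × Int))) :=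
  [("ab", [("x1", 2), ("y", 3)]), ("c", [("z", 0)])]

def Spec_clear_extras (frequency_dict : List (String × List (String × Int))) (out : List (String × List (String × Int))) : Prop := out = clear_extras_alt frequency_dict
instance (frequency_dict : List (String × List (String × Int))) (out : List (String × List (String × Int))) : Decidable (Spec_clear_extras frequency_dict out) := by unfold Spec_clear_extras; infer_instance

-- ===== CLAIM (what is proved, stated in full; the proofs are below) =====
def Claim_equal_clear_extras : Prop := ∀ (frequency_dict : List (String × List (String × Int))), Dom_clear_extras frequency_dict → Pre_clear_extras frequency_dict → Spec_clear_extras frequency_dict (clear_extras frequency_dict)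

-- ===== LEMMAS AND PROOFS =====

-- the disjointness test of B is the negation of A's digit test
lemma contains_pyDigits (c : Char) : pyDigits.contains c = (decide ('0' ≤ c) && decide (c ≤ '9')) := by
  have hchar : ∀ d : Char, c.toNat = d.toNat → c = d := fun d h => Char.ext (UInt32.toNat_inj.mp h)
  rw [Bool.eq_iff_iff]
  simp only [pyDigits, List.contains_cons, List.contains_nil, Bool.or_eq_true, beq_iff_eq,
    Bool.and_eq_true, decide_eq_true_eq, Bool.false_eq_true, or_false]
  have hle0 : ('0' ≤ c) ↔ 48 ≤ c.toNat := Iff.rfl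
  have hle9 : (c ≤ '9') ↔ c.toNat ≤ 57 := Iff.rfl
  constructor
  · rintro (rfl | rfl | rfl | rfl | rfl | rfl | rfl | rfl | rfl | rfl) <;> exact ⟨by decide, by decide⟩
  · rintro ⟨h1, h2⟩
    rw [hle0] at h1
    rw [hle9] at h2
    have hc : c.toNat = 48 ∨ c.toNat = 49 ∨ c.toNat = 50 ∨ c.toNat = 51 ∨ c.toNat = 52 ∨
        c.toNat = 53 ∨ c.toNat = 54 ∨ c.toNat = 55 ∨ c.toNat = 56 ∨ c.toNat = 57 := by omega
    rcases hc with h | h | h | h | h | h | h | h | h | h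
    · exact Or.inl (hchar '0' h)
    · exact Or.inr (Or.inl (hchar '1' h))
    · exact Or.inr (Or.inr (Or.inl (hchar '2' h)))
    · exact Or.inr (Or.inr (Or.inr (Or.inl (hchar '3' h))))
    · exact Or.inr (Or.inr (Or.inr (Or.inr (Or.inl (hchar '4' h)))))
    · exact Or.inr (Or.inr (Or.inr (Or.inr (Or.inr (Or.inl (hchar '5' h))))))
    · exact Or.inr (Or.inr (Or.inr (Or.inr (Or.inr (Or.inr (Or.inl (hchar '6' h)))))))
    · exact Or.inr (Or.inr (Or.inr (Or.inr (Or.inr (Or.inr (Or.inr (Or.inl (hchar '7' h))))))))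
    · exact Or.inr (Or.inr (Or.inr (Or.inr (Or.inr (Or.inr (Or.inr (Or.inr (Or.inl (hchar '8' h)))))))))
    · exact Or.inr (Or.inr (Or.inr (Or.inr (Or.inr (Or.inr (Or.inr (Or.inr (Or.inr (hchar '9' h)))))))))

-- the disjointness test of B is the negation of A's digit test
lemma digitsDisjoint_eq (s : String) : digitsDisjoint s = !pyHasDigit s := by
  unfold digitsDisjoint pyHasDigit
  have h : (fun c => !pyDigits.contains c) = fun c => !(decide ('0' ≤ c) && decide (c ≤ '9')) :=
    funext fun c => by rw [contains_pyDigits]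
  rw [h, List.all_eq_not_any_not]
  simp

-- the digit-containing keys of an inner dict, in order
def dkeys (inner : List (String × Int)) : List String :=
  (inner.filter (fun q => pyHasDigit q.1)).map Prod.fst

-- the remove_dict A's first phase builds, as a plain list
def rdOf (fd : List (String × List (String × Int))) : List (String × List String) :=
  (fd.filter (fun p => !(dkeys p.2).isEmpty)).map (fun p => (p.1, dkeys p.2))

def rdGetD (L : List (String × List String)) (k : String) : List String :=
  ((L.find? (fun e => e.1 == k)).map Prod.snd).getD []

lemma foldl_if_filter {α β : Type} (c : β → Bool) (f : α → β → α) (l : List β) (a : α) :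
    l.foldl (fun a x => if c x then f a x else a) a = (l.filter c).foldl f a := by
  induction l generalizing a with
  | nil => rfl
  | cons x xs ih =>
    by_cases h : c x <;> simp [h, ih]

lemma foldl_popKey_cons (ks : List String) (q : String × Int) (rest : List (String × Int))
    (h : ∀ s ∈ ks, s ≠ q.1) :
    ks.foldl popKey (q :: rest) = q :: ks.foldl popKey rest := by
  induction ks generalizing rest with
  | nil => rfl
  | cons s ks ih =>
    have hs : (q.1 == s) = false := beq_eq_false_iff_ne.2 (Ne.symm (h s (by simp)))
    have h1 : popKey (q :: rest) s = q :: popKey rest s := by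
      rw [popKey, hs]
      rfl
    rw [List.foldl_cons, h1]
    exact ih _ (fun t ht => h t (by simp [ht]))

lemma foldl_popKey_dkeys (inner : List (String × Int))
    (h : (inner.map Prod.fst).Nodup) :
    (dkeys inner).foldl popKey inner = inner.filter (fun q => !pyHasDigit q.1) := by
  induction inner with
  | nil => rfl
  | cons q rest ih =>
    simp only [List.map_cons, List.nodup_cons] at h
    have mem_dkeys : ∀ s ∈ dkeys rest, s ∈ rest.map Prod.fst := by
      intro s hs
      simp only [dkeys, List.mem_map, List.mem_filter] at hs ⊢
      rcases hs with ⟨r, ⟨hr, _⟩, rfl⟩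
      exact ⟨r, hr, rfl⟩
    by_cases hd : pyHasDigit q.1
    · have h1 : dkeys (q :: rest) = q.1 :: dkeys rest := by
        simp [dkeys, hd]
      have h2 : popKey (q :: rest) q.1 = rest := by simp [popKey]
      rw [h1, List.foldl_cons, h2, ih h.2, List.filter_cons]
      simp [hd]
    · have h1 : dkeys (q :: rest) = dkeys rest := by
        simp [dkeys, hd]
      have hne : ∀ s ∈ dkeys rest, s ≠ q.1 := fun s hs hsq =>
        h.1 (hsq ▸ mem_dkeys s hs)
      rw [h1, foldl_popKey_cons _ _ _ hne, ih h.2, List.filter_cons]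
      simp [hd]

lemma dictGet_of_mem (fd : List (String × List (String × Int))) (p : String × List (String × Int))
    (hnd : (fd.map Prod.fst).Nodup) (hp : p ∈ fd) : dictGet fd p.1 = p.2 := by
  induction fd with
  | nil => cases hp
  | cons r rest ih =>
    simp only [List.map_cons, List.nodup_cons] at hnd
    rcases List.mem_cons.1 hp with hp' | hp'
    · subst hp'; simp [dictGet, List.find?]
    · have hmem : p.1 ∈ rest.map Prod.fst := List.mem_map.2 ⟨p, hp', rfl⟩
      have hne : (r.1 == p.1) = false :=
        beq_eq_false_iff_ne.2 (fun he => hnd.1 (by rw [he]; exact hmem))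
      simp only [dictGet, List.find?, hne]
      exact ih hnd.2 hp'

lemma rdAppend_fresh (rd : List (String × List String)) (k v : String)
    (h : ∀ e ∈ rd, e.1 ≠ k) : rdAppend rd k v = rd ++ [(k, [v])] := by
  induction rd with
  | nil => rfl
  | cons e rest ih =>
    have : (e.1 == k) = false := by simpa using h e (by simp)
    simp only [rdAppend, this, Bool.false_eq_true, if_false, List.cons_append]
    exact congrArg _ (ih fun x hx => h x (by simp [hx]))

lemma rdAppend_last (rd : List (String × List String)) (k v : String) (acc : List String)
    (h : ∀ e ∈ rd, e.1 ≠ k) :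
    rdAppend (rd ++ [(k, acc)]) k v = rd ++ [(k, acc ++ [v])] := by
  induction rd with
  | nil => simp [rdAppend]
  | cons e rest ih =>
    have : (e.1 == k) = false := by simpa using h e (by simp)
    simp only [List.cons_append, rdAppend, this, Bool.false_eq_true, if_false]
    exact congrArg _ (ih fun x hx => h x (by simp [hx]))

lemma foldl_rdAppend_last (vs : List String) (rd : List (String × List String)) (k : String)
    (acc : List String) (h : ∀ e ∈ rd, e.1 ≠ k) :
    vs.foldl (fun rd v => rdAppend rd k v) (rd ++ [(k, acc)]) = rd ++ [(k, acc ++ vs)] := by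
  induction vs generalizing acc with
  | nil => simp
  | cons v vs ih =>
    simp only [List.foldl_cons, rdAppend_last rd k v acc h, ih (acc ++ [v])]
    simp

lemma foldl_rdAppend (vs : List String) (rd : List (String × List String)) (k : String)
    (h : ∀ e ∈ rd, e.1 ≠ k) :
    vs.foldl (fun rd v => rdAppend rd k v) rd = if vs.isEmpty then rd else rd ++ [(k, vs)] := by
  cases vs with
  | nil => rfl
  | cons v vs =>
    simp only [List.foldl_cons, rdAppend_fresh rd k v h, List.isEmpty_cons, if_false,
      Bool.false_eq_true]
    simpa using foldl_rdAppend_last vs rd k [v] h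

lemma rd_eq (fd : List (String × List (String × Int))) (rd0 : List (String × List String))
    (hnd : (fd.map Prod.fst).Nodup)
    (hfresh : ∀ p ∈ fd, ∀ e ∈ rd0, e.1 ≠ p.1) :
    fd.foldl (fun rd p => (dkeys p.2).foldl (fun rd s => rdAppend rd p.1 s) rd) rd0
      = rd0 ++ rdOf fd := by
  induction fd generalizing rd0 with
  | nil => simp [rdOf]
  | cons p rest ih =>
    simp only [List.map_cons, List.nodup_cons] at hnd
    simp only [List.foldl_cons]
    rw [foldl_rdAppend _ _ _ (fun e he => hfresh p (by simp) e he)]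
    by_cases he : (dkeys p.2).isEmpty
    · simp only [he, if_true]
      rw [ih _ hnd.2 (fun q hq e hee => hfresh q (List.mem_cons_of_mem _ hq) e hee)]
      simp [rdOf, he]
    · simp only [he, if_false, Bool.false_eq_true]
      rw [ih _ hnd.2 ?_]
      · simp [rdOf, he]
      · intro q hq e hee
        rcases List.mem_append.1 hee with hee | hee
        · exact hfresh q (List.mem_cons_of_mem _ hq) e hee
        · simp only [List.mem_singleton] at hee
          subst hee
          exact fun hc => hnd.1 (hc ▸ List.mem_map.2 ⟨q, hq, rfl⟩)

lemma find_rdOf (fd : List (String × List (String × Int))) (p : String × List (String × Int))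
    (hnd : (fd.map Prod.fst).Nodup) (hp : p ∈ fd) :
    rdGetD (rdOf fd) p.1 = dkeys p.2 ∨ ((dkeys p.2).isEmpty ∧ rdGetD (rdOf fd) p.1 = []) := by
  induction fd with
  | nil => cases hp
  | cons r rest ih =>
    simp only [List.map_cons, List.nodup_cons] at hnd
    rcases List.mem_cons.1 hp with hp' | hp'
    · subst hp'
      have hnone : (rdOf rest).find? (fun e => e.1 == p.1) = none := by
        rw [List.find?_eq_none]
        intro e he
        simp only [rdOf, List.mem_map, List.mem_filter] at he
        rcases he with ⟨q, ⟨hq, _⟩, he⟩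
        subst he
        have hqm : q.1 ∈ rest.map Prod.fst := List.mem_map.2 ⟨q, hq, rfl⟩
        intro hc
        exact hnd.1 (eq_of_beq hc ▸ hqm)
      by_cases he : (dkeys p.2).isEmpty
      · have h2 : rdOf (p :: rest) = rdOf rest := by
          simp [rdOf, he]
        right
        refine ⟨he, ?_⟩
        rw [rdGetD, h2, hnone]
        rfl
      · have h2 : rdOf (p :: rest) = (p.1, dkeys p.2) :: rdOf rest := by
          simp [rdOf, he]
        left
        rw [rdGetD, h2]
        simp
    · have hmem : p.1 ∈ rest.map Prod.fst := List.mem_map.2 ⟨p, hp', rfl⟩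
      have hne : ((r.1 : String) == p.1) = false :=
        beq_eq_false_iff_ne.2 (fun he2 => hnd.1 (by rw [he2]; exact hmem))
      have hstep : rdGetD (rdOf (r :: rest)) p.1 = rdGetD (rdOf rest) p.1 := by
        by_cases he : (dkeys r.2).isEmpty
        · have h2 : rdOf (r :: rest) = rdOf rest := by
            simp [rdOf, he]
          rw [h2]
        · have h2 : rdOf (r :: rest) = (r.1, dkeys r.2) :: rdOf rest := by
            simp [rdOf, he]
          rw [rdGetD, rdGetD, h2]
          simp [hne]
      rw [hstep]
      exact ih hnd.2 hp'

lemma popEntry_eq_map (fd : List (String × List (String × Int))) (k v : String)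
    (hnd : (fd.map Prod.fst).Nodup) :
    popEntry fd k v = fd.map (fun p => if p.1 == k then (p.1, popKey p.2 v) else p) := by
  induction fd with
  | nil => rfl
  | cons p rest ih =>
    simp only [List.map_cons, List.nodup_cons] at hnd
    by_cases hp : (p.1 == k)
    · have hk : p.1 = k := by simpa using hp
      have hrest : rest.map (fun p => if p.1 == k then (p.1, popKey p.2 v) else p) = rest := by
        rw [List.map_congr_left (g := id), List.map_id]
        intro q hq
        have hmem : q.1 ∈ rest.map Prod.fst := List.mem_map.2 ⟨q, hq, rfl⟩
        have hq1 : (q.1 == k) = false :=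
          beq_eq_false_iff_ne.2 (fun he2 => hnd.1 (by rw [hk, ← he2]; exact hmem))
        simp [hq1]
      have hcons : popEntry (p :: rest) k v = (p.1, popKey p.2 v) :: rest := by
        simp [popEntry, hp]
      rw [hcons, List.map_cons, if_pos hp, hrest]
    · simp only [popEntry, hp, Bool.false_eq_true, if_false, List.map_cons]
      exact congrArg _ (ih hnd.2)

lemma keys_map_pop (fd : List (String × List (String × Int))) (k : String)
    (g : List (String × Int) → List (String × Int)) :
    (fd.map (fun p => if p.1 == k then (p.1, g p.2) else p)).map Prod.fst
      = fd.map Prod.fst := by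
  rw [List.map_map]
  apply List.map_congr_left
  intro p _
  by_cases hp : p.1 = k <;> simp [hp]

lemma popMany_eq_map (vs : List String) (fd : List (String × List (String × Int))) (k : String)
    (hnd : (fd.map Prod.fst).Nodup) :
    vs.foldl (fun acc v => popEntry acc k v) fd
      = fd.map (fun p => if p.1 == k then (p.1, vs.foldl popKey p.2) else p) := by
  induction vs generalizing fd with
  | nil =>
    simp only [List.foldl_nil]
    rw [List.map_congr_left (g := id), List.map_id]
    intro p _
    by_cases hp : p.1 = k
    · subst hp
      simp
    · have hb : (p.1 == k) = false := beq_eq_false_iff_ne.2 hp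
      simp [hb]
  | cons v vs ih =>
    simp only [List.foldl_cons]
    rw [popEntry_eq_map fd k v hnd,
      ih _ (by rw [keys_map_pop fd k (fun inner => popKey inner v)]; exact hnd), List.map_map]
    apply List.map_congr_left
    intro p _
    by_cases hp : p.1 = k
    · subst hp
      simp
    · have hb : (p.1 == k) = false := beq_eq_false_iff_ne.2 hp
      simp [hb, hp]

lemma apply_eq (L : List (String × List String)) (fd : List (String × List (String × Int)))
    (hnd : (fd.map Prod.fst).Nodup) (hL : (L.map Prod.fst).Nodup) :
    L.foldl (fun acc kv => kv.2.foldl (fun acc v => popEntry acc kv.1 v) acc) fd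
      = fd.map (fun p => (p.1, (rdGetD L p.1).foldl popKey p.2)) := by
  induction L generalizing fd with
  | nil => simp [rdGetD]
  | cons kv L ih =>
    simp only [List.map_cons, List.nodup_cons] at hL
    simp only [List.foldl_cons]
    rw [popMany_eq_map kv.2 fd kv.1 hnd,
      ih _ (by rw [keys_map_pop fd kv.1 (fun inner => List.foldl popKey inner kv.2)]; exact hnd) hL.2, List.map_map]
    apply List.map_congr_left
    intro p _
    by_cases hp : p.1 = kv.1
    · have hb : (p.1 == kv.1) = true := beq_iff_eq.2 hp
      have hb2 : (kv.1 == p.1) = true := beq_iff_eq.2 hp.symm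
      have hnone : (L.find? (fun e => e.1 == kv.1)) = none := by
        rw [List.find?_eq_none]
        intro e he hc
        exact hL.1 (by
          rw [← eq_of_beq hc]
          exact List.mem_map.2 ⟨e, he, rfl⟩)
      simp [hp, rdGetD, hnone]
    · have hb : (p.1 == kv.1) = false := beq_eq_false_iff_ne.2 hp
      have hb2 : (kv.1 == p.1) = false := beq_eq_false_iff_ne.2 (Ne.symm hp)
      simp [hb2, hp, rdGetD]

-- ===== VERDICT (by name: the statement is the Claim_ definition above) =====
theorem clear_extras_spec : Claim_equal_clear_extras := by
  intro fd _ hpre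
  obtain ⟨hnd, hinner⟩ := hpre
  unfold Spec_clear_extras clear_extras clear_extras_alt
  -- phase 1: the foldl over keys equals the foldl over entries (nodup outer keys)
  have h1 : (fd.map Prod.fst).foldl (fun rd key =>
        (dictGet fd key).foldl (fun rd q =>
          if pyHasDigit q.1 then rdAppend rd key q.1 else rd) rd) []
      = ([] : List (String × List String)) ++ rdOf fd := by
    rw [List.foldl_map]
    rw [PySem.List.foldl_congr_mem fd _
      (fun rd p => (dkeys p.2).foldl (fun rd s => rdAppend rd p.1 s) rd) []
      (by
        intro rd p hp
        rw [dictGet_of_mem fd p hnd hp, foldl_if_filter]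
        exact (List.foldl_map).symm)]
    exact rd_eq fd [] hnd (by simp)
  rw [h1, List.nil_append, apply_eq (rdOf fd) fd hnd ?_]
  · apply List.map_congr_left
    intro p hp
    have hin : (p.2.map Prod.fst).Nodup := hinner p hp
    have hfil : p.2.filter (fun q => digitsDisjoint q.1)
        = p.2.filter (fun q => !pyHasDigit q.1) := by
      apply List.filter_congr
      intro q _
      rw [digitsDisjoint_eq]
    rcases find_rdOf fd p hnd hp with hg | ⟨he, hg⟩
    · rw [hg, foldl_popKey_dkeys p.2 hin, hfil]
    · rw [hg, List.foldl_nil, hfil, ← foldl_popKey_dkeys p.2 hin]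
      rw [List.isEmpty_iff.1 he, List.foldl_nil]
  · have : (rdOf fd).map Prod.fst = (fd.filter (fun p => !(dkeys p.2).isEmpty)).map Prod.fst := by
      simp [rdOf, List.map_map]
    rw [this]
    exact List.Nodup.sublist ((List.filter_sublist (l := fd)).map Prod.fst) hnd
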